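-- pv_equiv track=rewrite | github.com/xkhanhnguyen/codesignal-arcade | The Core/48_WeakNumbers.py | solution
-- ===== SOURCE A (Python) =====
-- def solution(n):
--     numbDivisors = []
--     weaknesses = []
--     for i in range(1, n + 1):
--         weakness = 0
--         d = len([x for x in range(1,i+1) if not i % x])
--         numbDivisors.append(d)
--
--     for num, num_factors in enumerate(numbDivisors, 1):
--         weakness = 0
--         for factor in numbDivisors[:num]:
--             if factor > num_factors:
--                 weakness += 1
--         weaknesses.append(weakness)
--     weakest = max(weaknesses)
--     return [weakest, weaknesses.count(weakest)]
-- ===== SOURCE B (Python) =====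
-- def solution(n):
--     # divisor counts 1..n by a sieve over multiples, then one pass with a
--     # frequency table of earlier divisor-counts + running (max, multiplicity)
--     d = [0] * (n + 1)
--     for x in range(1, n + 1):
--         for m in range(x, n + 1, x):
--             d[m] += 1
--     best = -1
--     tally = 0
--     freq = {}
--     for c in d[1:]:
--         w = sum(cnt for v, cnt in freq.items() if v > c)
--         if w > best:
--             best = w
--             tally = 1
--         elif w == best:
--             tally += 1
--         freq[c] = freq.get(c, 0) + 1
--     return [best, tally]
-- ===== Notes on version B (the rewrite author's own statement) =====
-- stated objective: faster
-- what changed: Divisor counts are computed by a multiples sieve instead of per-number trial division, and the weakness maximum and its multiplicity are tracked in one pass using a frequency table of earlier divisor-counts instead of slicing the prefix for every element and then running max() and count().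
import Mathlib
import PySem

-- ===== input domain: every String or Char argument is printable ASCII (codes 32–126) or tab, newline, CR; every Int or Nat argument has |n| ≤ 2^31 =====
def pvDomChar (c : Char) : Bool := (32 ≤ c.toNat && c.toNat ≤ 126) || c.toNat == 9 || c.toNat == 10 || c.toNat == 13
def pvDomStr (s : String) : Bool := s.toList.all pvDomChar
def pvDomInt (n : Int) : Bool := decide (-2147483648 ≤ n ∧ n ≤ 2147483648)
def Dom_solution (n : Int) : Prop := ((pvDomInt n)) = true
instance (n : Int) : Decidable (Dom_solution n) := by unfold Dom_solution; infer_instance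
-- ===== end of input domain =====

-- B computes divisor counts with a multiples sieve and tracks the weakness maximum and its
-- multiplicity in one pass over a frequency table of earlier divisor-counts, instead of A's
-- per-number trial division and per-element prefix slices followed by max() and count().
-- Pre_ excludes n ≤ 0, where A's max([]) raises ValueError.


-- ===== PORT A =====
-- first loop: numbDivisors.append(len([x for x in range(1,i+1) if not i % x]))
def aDivisors (n : Int) : List Int :=
  (PySem.List.pyRange 1 (n+1)).foldl
    (fun acc i =>
      acc ++ [(((PySem.List.pyRange 1 (i+1)).filter (fun x => PySem.Int.mod i x == 0)).length : Int)])
    []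

-- second loop: for num, num_factors in enumerate(nd, 1): count factors > num_factors in nd[:num]
def aWeakList (nd : List Int) : List Int :=
  (PySem.List.enumerate nd 1).foldl
    (fun acc p =>
      acc ++ [(PySem.List.slice nd none (some p.1)).foldl
                (fun w factor => if p.2 < factor then w + 1 else w) 0])
    []

def solution (n : Int) : List Int :=
  let numbDivisors := aDivisors n
  let weaknesses := aWeakList numbDivisors
  match PySem.List.max? weaknesses (fun y => y) with
  | some weakest => [weakest, (weaknesses.count weakest : Int)]
  | none => []  -- unreachable inside Pre_: Python's max([]) raises ValueError there

-- ===== PORT B =====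
-- sieve: d = [0]*(n+1); for x in 1..n: for m in x, 2x, .. ≤ n: d[m] += 1
def bSieve (n : Int) : List Int :=
  (PySem.List.pyRange 1 (n+1)).foldl
    (fun d x =>
      (PySem.List.pyRange x (n+1) x).foldl
        (fun d m => d.set m.toNat (d.getD m.toNat 0 + 1)) d)
    (PySem.List.pyRepeat [0] (n+1))

-- one step of B's single pass: state = (best, tally, freq)
def bStep (st : Int × Int × PySem.Dict Int Int) (c : Int) : Int × Int × PySem.Dict Int Int :=
  let w : Int := ((st.2.2.items.filter (fun p => decide (c < p.1))).map (fun p => p.2)).sum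
  let bt : Int × Int :=
    if st.1 < w then (w, 1)
    else if w = st.1 then (st.1, st.2.1 + 1)
    else (st.1, st.2.1)
  (bt.1, bt.2, st.2.2.insert c (st.2.2.getD c 0 + 1))

def solution_alt (n : Int) : List Int :=
  let fin := (PySem.List.slice (bSieve n) (some 1) none).foldl bStep
    ((-1 : Int), (0 : Int), (PySem.Dict.empty : PySem.Dict Int Int))
  [fin.1, fin.2.1]

-- ===== PRECONDITION & SPEC =====
-- Pre_ excludes exactly n ≤ 0: there A's weaknesses list is empty and max([]) raises ValueError.
def Pre_solution (n : Int) : Prop := 1 ≤ n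
instance (n : Int) : Decidable (Pre_solution n) := by unfold Pre_solution; infer_instance
def pvWitness_solution : Int := 5

def Spec_solution (n : Int) (out : List Int) : Prop := out = solution_alt n
instance (n : Int) (out : List Int) : Decidable (Spec_solution n out) := by unfold Spec_solution; infer_instance

-- ===== CLAIM (what is proved, stated in full; the proofs are below) =====
def Claim_equal_solution : Prop := ∀ (n : Int), Dom_solution n → Pre_solution n → Spec_solution n (solution n)

-- ===== LEMMAS AND PROOFS =====

-- weakness values of a suffix, relative to the already-seen prefix `pre`
def WS (pre : List Int) : List Int → List Int
  | [] => []
  | c :: rest => ((pre.countP (fun v => decide (c < v)) : Nat) : Int) :: WS (pre ++ [c]) rest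

-- running maximum with Python-loop seed -1
def M (l : List Int) : Int := l.foldl max (-1)

lemma WS_append (l1 l2 pre : List Int) :
    WS pre (l1 ++ l2) = WS pre l1 ++ WS (pre ++ l1) l2 := by
  induction l1 generalizing pre with
  | nil => simp [WS]
  | cons c t ih => simp [WS, ih, List.append_assoc]

-- ===== A-side characterisation =====

lemma aWeak_enum (full : List Int) :
    ∀ (cs pre : List Int), full = pre ++ cs →
    (PySem.List.enumerate cs ((pre.length : Int) + 1)).map
      (fun p => (0 : Int) +
        ((List.countP (fun f => decide (p.2 < f)) (PySem.List.slice full none (some p.1)) : Nat) : Int))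
    = WS pre cs := by
  intro cs
  induction cs with
  | nil => intro pre h; simp [PySem.List.enumerate, WS]
  | cons c rest ih =>
    intro pre h
    rw [PySem.List.enumerate_cons]
    simp only [List.map_cons]
    have hfull : full = (pre ++ [c]) ++ rest := by simp [h]
    have hhead :
        PySem.List.slice full none (some ((pre.length : Int) + 1)) = pre ++ [c] := by
      rw [PySem.List.slice_to full (by positivity)]
      have ht : ((pre.length : Int) + 1).toNat = (pre ++ [c]).length := by
        simp
      rw [ht, hfull, List.take_left]
    have hcnt : List.countP (fun f => decide (c < f)) (pre ++ [c])
        = List.countP (fun v => decide (c < v)) pre := by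
      rw [List.countP_append]; simp
    have hstart : ((pre.length : Int) + 1) + 1 = (((pre ++ [c]).length : Int) + 1) := by
      simp
    have htail := ih (pre ++ [c]) (by simpa using hfull)
    rw [hstart, htail, hhead, hcnt]
    simp [WS]

lemma aWeakList_eq_WS (cs : List Int) : aWeakList cs = WS [] cs := by
  unfold aWeakList
  rw [PySem.List.foldl_append_singleton_eq_map
    (f := fun p : Int × Int => (PySem.List.slice cs none (some p.1)).foldl
      (fun w factor => if p.2 < factor then w + 1 else w) 0)]
  rw [List.nil_append]
  rw [List.map_congr_left (fun p _ =>
    PySem.List.foldl_ite_add_one (p := fun factor => p.2 < factor)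
      (PySem.List.slice cs none (some p.1)) 0)]
  have := aWeak_enum cs cs [] (by simp)
  simpa using this

-- A's divisor-count list as a map
lemma aDivisors_eq_map (n : Int) :
    aDivisors n = (PySem.List.pyRange 1 (n+1)).map
      (fun i => ((List.countP (fun x => PySem.Int.mod i x == 0) (PySem.List.pyRange 1 (i+1)) : Nat) : Int)) := by
  unfold aDivisors
  rw [PySem.List.foldl_append_singleton_eq_map
    (f := fun i => (((PySem.List.pyRange 1 (i+1)).filter (fun x => PySem.Int.mod i x == 0)).length : Int))]
  simp [List.countP_eq_length_filter]

-- ===== sieve characterisation =====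

lemma length_bumpFold (idxs : List Int) (D : List Int) :
    (idxs.foldl (fun d m => d.set m.toNat (d.getD m.toNat 0 + 1)) D).length = D.length := by
  induction idxs generalizing D with
  | nil => rfl
  | cons m t ih => rw [List.foldl_cons, ih, List.length_set]

lemma getD_bumpFold (idxs : List Int) (D : List Int) (j : Nat)
    (hin : ∀ m ∈ idxs, m.toNat < D.length) :
    (idxs.foldl (fun d m => d.set m.toNat (d.getD m.toNat 0 + 1)) D).getD j 0
      = D.getD j 0 + (idxs.countP (fun m => m.toNat == j) : Int) := by
  induction idxs generalizing D with
  | nil => simp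
  | cons m t ih =>
    have hm : m.toNat < D.length := hin m (by simp)
    have hlen : (D.set m.toNat (D.getD m.toNat 0 + 1)).length = D.length := by simp
    rw [List.foldl_cons, ih (D.set m.toNat (D.getD m.toNat 0 + 1))
      (by intro m' hm'; rw [hlen]; exact hin m' (by simp [hm']))]
    have hset : (D.set m.toNat (D.getD m.toNat 0 + 1)).getD j 0
        = D.getD j 0 + (if m.toNat = j then 1 else 0) := by
      by_cases hmj : m.toNat = j
      · subst hmj
        have hg : (D.set m.toNat (D.getD m.toNat 0 + 1))[m.toNat]? = some (D.getD m.toNat 0 + 1) := by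
          rw [List.getElem?_set]; simp [hm]
        rw [List.getD_eq_getElem?_getD, hg, if_pos rfl]
        rfl
      · have hg : (D.set m.toNat (D.getD m.toNat 0 + 1))[j]? = D[j]? := by
          rw [List.getElem?_set]; simp [hmj]
        rw [List.getD_eq_getElem?_getD, hg, ← List.getD_eq_getElem?_getD, if_neg hmj, add_zero]
    rw [hset, List.countP_cons]
    by_cases hmj : m.toNat = j <;> simp [hmj] <;> push_cast <;> omega

lemma nodup_pyRange_pos (a b s : Int) (hs : 0 < s) : (PySem.List.pyRange a b s).Nodup := by
  rw [PySem.List.pyRange_of_pos a b hs]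
  refine List.Nodup.map ?_ List.nodup_range
  intro p q h
  have h' : a + s * (p : Int) = a + s * (q : Int) := h
  have : (p : Int) = q := mul_left_cancel₀ (ne_of_gt hs) (by omega)
  exact_mod_cast this

lemma countP_multiples (x n j : Int) (hx : 0 < x) (hj1 : 1 ≤ j) (hjn : j ≤ n) :
    ((PySem.List.pyRange x (n+1) x).countP (fun m => m.toNat == j.toNat) : Int)
      = if x ∣ j then 1 else 0 := by
  have hmem : ∀ m ∈ PySem.List.pyRange x (n+1) x, x ≤ m :=
    fun m hm => ((PySem.List.mem_pyRange_iff_of_pos hx m).1 hm).1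
  have hcongr : ∀ m ∈ PySem.List.pyRange x (n+1) x,
      (fun m : Int => m.toNat == j.toNat) m = ((fun m : Int => m == j) m) := by
    intro m hm
    have hxm := hmem m hm
    by_cases h : m = j
    · subst h; simp
    · have h2 : m.toNat ≠ j.toNat := by omega
      simp [h, h2]
  rw [List.countP_eq_length_filter, List.filter_congr hcongr, ← List.countP_eq_length_filter]
  have hcount : (PySem.List.pyRange x (n+1) x).countP (fun m => m == j)
      = (PySem.List.pyRange x (n+1) x).count j := rfl
  rw [hcount]
  by_cases hdvd : x ∣ j
  · have hjmem : j ∈ PySem.List.pyRange x (n+1) x := by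
      rw [PySem.List.mem_pyRange_iff_of_pos hx]
      exact ⟨Int.le_of_dvd (by omega) hdvd, by omega, dvd_sub hdvd dvd_rfl⟩
    rw [List.count_eq_one_of_mem (nodup_pyRange_pos _ _ _ hx) hjmem]
    simp [hdvd]
  · have hnot : j ∉ PySem.List.pyRange x (n+1) x := by
      rw [PySem.List.mem_pyRange_iff_of_pos hx]
      rintro ⟨h1, h2, h3⟩
      exact hdvd (by have := dvd_add h3 (dvd_refl x); simpa using this)
    rw [List.count_eq_zero_of_not_mem hnot]
    simp [hdvd]

lemma sieve_fold_getD (n : Int) (xs : List Int) (hx : ∀ x ∈ xs, 0 < x)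
    (D : List Int) (hD : D.length = (n+1).toNat) (j : Int) (hj1 : 1 ≤ j) (hjn : j ≤ n) :
    (xs.foldl (fun d x =>
        (PySem.List.pyRange x (n+1) x).foldl
          (fun d m => d.set m.toNat (d.getD m.toNat 0 + 1)) d) D).getD j.toNat 0
      = D.getD j.toNat 0 + (xs.countP (fun x => decide (x ∣ j)) : Int) := by
  induction xs generalizing D with
  | nil => simp
  | cons x t ih =>
    have hx0 : 0 < x := hx x (by simp)
    have hinner : ∀ m ∈ PySem.List.pyRange x (n+1) x, m.toNat < D.length := by
      intro m hm
      have h := (PySem.List.mem_pyRange_iff_of_pos hx0 m).1 hm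
      omega
    rw [List.foldl_cons,
        ih (fun y hy => hx y (by simp [hy])) _
          (by rw [length_bumpFold]; exact hD),
        getD_bumpFold _ _ _ hinner, countP_multiples x n j hx0 hj1 hjn, List.countP_cons]
    by_cases h : x ∣ j <;> simp [h] <;> push_cast <;> omega

lemma length_sieveInner (n : Int) (xs : List Int) (D : List Int) :
    (xs.foldl (fun d x =>
        (PySem.List.pyRange x (n+1) x).foldl
          (fun d m => d.set m.toNat (d.getD m.toNat 0 + 1)) d) D).length = D.length := by
  induction xs generalizing D with
  | nil => rfl
  | cons x t ih => rw [List.foldl_cons, ih, length_bumpFold]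

lemma length_pyRange_one (n : Int) (hn : 1 ≤ n) :
    (PySem.List.pyRange 1 (n+1)).length = n.toNat := by
  rw [PySem.List.pyRange_of_pos 1 (n+1) (by norm_num)]
  simp only [List.length_map, List.length_range]
  rw [if_pos (by omega : (1:Int) < n+1)]
  have : (n + 1 - 1 + 1 - 1) / 1 = n := by omega
  rw [this]

lemma pyRange_getElem_one (n : Int) (k : Nat) (hk : k < (PySem.List.pyRange 1 (n+1)).length) :
    (PySem.List.pyRange 1 (n+1))[k] = (k : Int) + 1 := by
  have h := PySem.List.pyRange_of_pos 1 (n+1) (by norm_num : (0:Int) < 1)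
  simp only [h] at hk ⊢
  simp at hk ⊢
  omega

lemma divisor_count_ext (n i : Int) (h1 : 1 ≤ i) (h2 : i ≤ n) :
    List.countP (fun x => PySem.Int.mod i x == 0) (PySem.List.pyRange 1 (i+1))
    = List.countP (fun x => decide (x ∣ i)) (PySem.List.pyRange 1 (n+1)) := by
  have hpred : ∀ x ∈ PySem.List.pyRange 1 (i+1),
      (fun x : Int => PySem.Int.mod i x == 0) x = ((fun x : Int => decide (x ∣ i)) x) := by
    intro x _
    by_cases h : x ∣ i
    · simp [h, (PySem.Int.mod_eq_zero_iff_dvd i x).2 h]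
    · have hne : PySem.Int.mod i x ≠ 0 := fun hc => h ((PySem.Int.mod_eq_zero_iff_dvd i x).1 hc)
      simp [h, hne]
  rw [List.countP_eq_length_filter, List.filter_congr hpred, ← List.countP_eq_length_filter]
  rw [PySem.List.pyRange_one_append 1 (i+1) (n+1) (by omega) (by omega), List.countP_append]
  have hzero : List.countP (fun x => decide (x ∣ i)) (PySem.List.pyRange (i+1) (n+1)) = 0 := by
    rw [List.countP_eq_zero]
    intro a ha
    have hm := (PySem.List.mem_pyRange_iff_of_pos (by norm_num : (0:Int) < 1) a).1 ha
    simp only [decide_eq_true_eq]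
    intro hdvd
    have := Int.le_of_dvd (by omega) hdvd
    omega
  rw [hzero, add_zero]

-- B's counts list equals A's divisor list
lemma counts_eq_aDivisors (n : Int) (hn : 1 ≤ n) :
    PySem.List.slice (bSieve n) (some 1) none = aDivisors n := by
  rw [PySem.List.slice_from _ (by norm_num : (0:Int) ≤ 1), aDivisors_eq_map]
  have hpos : ∀ x ∈ PySem.List.pyRange 1 (n+1), 0 < x :=
    fun x hx => by
      have := (PySem.List.mem_pyRange_iff_of_pos (by norm_num : (0:Int) < 1) x).1 hx
      omega
  have hlen0 : (PySem.List.pyRepeat ([0] : List Int) (n+1)).length = (n+1).toNat := by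
    rw [PySem.List.pyRepeat_singleton]; simp
  have hlenS : (bSieve n).length = (n+1).toNat := by
    unfold bSieve; rw [length_sieveInner, hlen0]
  apply List.ext_getElem
  · simp [hlenS, length_pyRange_one n hn]
    omega
  · intro k h1 h2
    have hk : k < n.toNat := by
      simpa [length_pyRange_one n hn] using h2
    have hkk : (1:Int).toNat + k < (bSieve n).length := by
      rw [hlenS]; omega
    rw [List.getElem_drop, List.getElem_map, pyRange_getElem_one n k (by rw [length_pyRange_one n hn]; exact hk)]
    have hgetD : (bSieve n)[(1:Int).toNat + k] = (bSieve n).getD ((1:Int).toNat + k) 0 := by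
      rw [List.getD_eq_getElem _ _ hkk]
    rw [hgetD]
    have hj1 : (1:Int) ≤ (k : Int) + 1 := by omega
    have hjn : (k : Int) + 1 ≤ n := by omega
    have hsv := sieve_fold_getD n (PySem.List.pyRange 1 (n+1)) hpos
      (PySem.List.pyRepeat [0] (n+1)) hlen0 ((k : Int) + 1) hj1 hjn
    have htn : ((k : Int) + 1).toNat = (1:Int).toNat + k := by omega
    rw [htn] at hsv
    have hrep : (PySem.List.pyRepeat ([0] : List Int) (n+1)).getD ((1:Int).toNat + k) 0 = 0 := by
      rw [PySem.List.pyRepeat_singleton]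
      rcases Nat.lt_or_ge ((1:Int).toNat + k) (n+1).toNat with h | h
      · rw [List.getD_eq_getElem _ _ (by simpa using h)]; simp
      · rw [List.getD_eq_default _ _ (by simpa using h)]
    unfold bSieve
    rw [hsv, hrep, zero_add, divisor_count_ext n ((k : Int) + 1) hj1 hjn]

-- ===== B-side one-pass characterisation =====

lemma sum_indicator (l : List Int) (y : Int) :
    (l.map (fun k => if y = k then (1 : Int) else 0)).sum = (l.count y : Int) := by
  induction l with
  | nil => simp
  | cons a t ih =>
    by_cases h : y = a
    · subst h; simp [List.count_cons, ih] <;> omega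
    · simp [List.count_cons, ih, h, Ne.symm h] <;> omega

lemma sum_counts_filter (xs : List Int) (p : Int → Bool) :
    (((PySem.Set.ofList xs).filter p).map (fun k => ((xs.count k : Nat) : Int))).sum
      = ((xs.countP p : Nat) : Int) := by
  induction xs using List.reverseRecOn with
  | nil => simp [PySem.Set.ofList]
  | append_singleton xs y ih =>
    have hadd : PySem.Set.ofList (xs ++ [y]) = PySem.Set.add (PySem.Set.ofList xs) y := by
      rw [PySem.Set.ofList_eq_foldl, PySem.Set.ofList_eq_foldl, List.foldl_append]
      rfl
    have hcntP : ((List.countP p (xs ++ [y]) : Nat) : Int)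
        = ((List.countP p xs : Nat) : Int) + (if p y then 1 else 0) := by
      rw [List.countP_append]
      by_cases h : p y <;> simp [List.countP_cons, h]
    rw [hadd, hcntP]
    by_cases hy : y ∈ xs
    · have hyS : y ∈ PySem.Set.ofList xs := (PySem.Set.mem_ofList xs y).2 hy
      have hSadd : PySem.Set.add (PySem.Set.ofList xs) y = PySem.Set.ofList xs := by
        simp [PySem.Set.add, PySem.Set.contains, hyS]
      rw [hSadd]
      have hsplit : ∀ k ∈ (PySem.Set.ofList xs).filter p,
          (((xs ++ [y]).count k : Nat) : Int)
            = ((xs.count k : Nat) : Int) + (if y = k then 1 else 0) := by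
        intro k _
        rw [List.count_append, List.count_singleton]
        by_cases h : y = k <;> simp [h]
      rw [List.map_congr_left hsplit, PySem.List.sum_map_add_int, ih, sum_indicator]
      have hcy : (((PySem.Set.ofList xs).filter p).count y : Int) = if p y then 1 else 0 := by
        by_cases hp : p y
        · rw [List.count_eq_one_of_mem ((PySem.Set.nodup_ofList xs).filter p)
            (List.mem_filter.2 ⟨hyS, hp⟩)]
          simp [hp]
        · rw [List.count_eq_zero_of_not_mem (fun hmem => hp (List.of_mem_filter hmem))]
          simp [hp]
      rw [hcy]
    · have hyS : y ∉ PySem.Set.ofList xs := fun h => hy ((PySem.Set.mem_ofList xs y).1 h)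
      have hSadd : PySem.Set.add (PySem.Set.ofList xs) y = PySem.Set.ofList xs ++ [y] := by
        simp [PySem.Set.add, PySem.Set.contains, hyS]
      rw [hSadd, List.filter_append, List.map_append, List.sum_append]
      have hsame : ∀ k ∈ (PySem.Set.ofList xs).filter p,
          (((xs ++ [y]).count k : Nat) : Int) = ((xs.count k : Nat) : Int) := by
        intro k hk
        have hkS : k ∈ PySem.Set.ofList xs := List.mem_of_mem_filter hk
        have hkxs : k ∈ xs := (PySem.Set.mem_ofList xs k).1 hkS
        have hne : y ≠ k := fun h => hy (h ▸ hkxs)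
        rw [List.count_append, List.count_singleton]
        simp [hne]
      rw [List.map_congr_left hsame, ih]
      have hcy : (((List.filter p [y]).map (fun k => (((xs ++ [y]).count k : Nat) : Int))).sum)
          = if p y then 1 else 0 := by
        by_cases hp : p y
        · simp only [List.filter_singleton, hp, if_pos]
          simp [List.count_append, List.count_eq_zero_of_not_mem hy]
        · simp [List.filter_singleton, hp]
      rw [hcy]

lemma sumItems (pre : List Int) (c : Int) :
    (((PySem.Dict.counter pre).items.filter (fun p => decide (c < p.1))).map (fun p => p.2)).sum
      = ((pre.countP (fun v => decide (c < v)) : Nat) : Int) := by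
  rw [PySem.Dict.items_counter, List.filter_map, List.map_map]
  have h1 : ((fun p : Int × Int => decide (c < p.1)) ∘ fun k => (k, ((pre.count k : Nat) : Int)))
      = fun k => decide (c < k) := rfl
  have h2 : ((fun p : Int × Int => p.2) ∘ fun k => (k, ((pre.count k : Nat) : Int)))
      = fun k => ((pre.count k : Nat) : Int) := rfl
  rw [h1, h2]
  exact sum_counts_filter pre _

lemma counter_insert_step (pre : List Int) (c : Int) :
    (PySem.Dict.counter pre).insert c ((PySem.Dict.counter pre).getD c 0 + 1)
      = PySem.Dict.counter (pre ++ [c]) := by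
  rw [← PySem.Dict.foldl_insert_getD_add_one_eq_counter pre,
      ← PySem.Dict.foldl_insert_getD_add_one_eq_counter (pre ++ [c]),
      List.foldl_append]
  rfl

lemma loopInv (rest : List Int) : ∀ (pre : List Int),
    rest.foldl bStep
      (M (WS [] pre), (((WS [] pre).count (M (WS [] pre)) : Nat) : Int), PySem.Dict.counter pre)
    = (M (WS [] (pre ++ rest)),
       (((WS [] (pre ++ rest)).count (M (WS [] (pre ++ rest))) : Nat) : Int),
       PySem.Dict.counter (pre ++ rest)) := by
  induction rest with
  | nil => intro pre; simp
  | cons c rest' ih =>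
    intro pre
    rw [List.foldl_cons]
    set w : Int := ((pre.countP (fun v => decide (c < v)) : Nat) : Int) with hw
    have hws' : WS [] (pre ++ [c]) = WS [] pre ++ [w] := by
      rw [WS_append]; simp [WS, hw]
    have hb : bStep
        (M (WS [] pre), (((WS [] pre).count (M (WS [] pre)) : Nat) : Int), PySem.Dict.counter pre) c
        = (M (WS [] (pre ++ [c])),
           (((WS [] (pre ++ [c])).count (M (WS [] (pre ++ [c]))) : Nat) : Int),
           PySem.Dict.counter (pre ++ [c])) := by
      set ws := WS [] pre with hwsdef
      unfold bStep
      simp only [sumItems, counter_insert_step]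
      rw [← hw]
      have hMax : M (ws ++ [w]) = max (M ws) w := by
        unfold M
        rw [List.foldl_append]
        rfl
      rw [hws', hMax]
      by_cases h1 : M ws < w
      · have hnotmem : w ∉ ws := fun hmem =>
          absurd ((PySem.List.le_foldl_max ws (-1)).2 w hmem) (not_le.2 h1)
        rw [max_eq_right (le_of_lt h1), List.count_append,
            List.count_eq_zero_of_not_mem hnotmem, List.count_singleton]
        simp [h1] <;> push_cast <;> ring
      · by_cases h2 : w = M ws
        · rw [max_eq_left (le_of_eq h2), List.count_append, List.count_singleton]
          simp [h1, h2] <;> push_cast <;> ring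
        · have hlt : w < M ws := lt_of_le_of_ne (not_lt.1 h1) h2
          rw [max_eq_left (le_of_lt hlt), List.count_append, List.count_singleton]
          simp [h1, h2] <;> push_cast <;> ring
    rw [hb, ih (pre ++ [c])]
    simp

-- assembling B's pass and A's max/count over the same counts list
lemma final_eq (cs : List Int) (hne : cs ≠ []) :
    (match PySem.List.max? (aWeakList cs) (fun y => y) with
      | some weakest => [weakest, ((aWeakList cs).count weakest : Int)]
      | none => [])
    = (let fin := cs.foldl bStep ((-1 : Int), (0 : Int), (PySem.Dict.empty : PySem.Dict Int Int));
       [fin.1, fin.2.1]) := by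
  obtain ⟨c, cs', rfl⟩ := List.exists_cons_of_ne_nil hne
  have hws : WS [] (c :: cs') = 0 :: WS [c] cs' := by
    simp [WS]
  have hM : M (WS [] (c :: cs')) = (WS [c] cs').foldl max 0 := by
    unfold M
    rw [hws, List.foldl_cons]
    norm_num
  have hinit : ((-1 : Int), (0 : Int), (PySem.Dict.empty : PySem.Dict Int Int))
      = (M (WS [] ([] : List Int)),
         (((WS [] ([] : List Int)).count (M (WS [] ([] : List Int))) : Nat) : Int),
         PySem.Dict.counter ([] : List Int)) := by
    simp [M, WS]; rfl
  have hloop := loopInv (c :: cs') []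
  rw [← hinit] at hloop
  rw [aWeakList_eq_WS, hws, PySem.List.max?_id_cons]
  simp only [List.nil_append] at hloop
  rw [hloop, ← hws]
  simp only [hM]

-- ===== VERDICT (by name: the statement is the Claim_ definition above) =====
theorem solution_spec : Claim_equal_solution := by
  intro n _ hn
  unfold Spec_solution
  show solution n = solution_alt n
  have hn' : (1 : Int) ≤ n := hn
  have hne : aDivisors n ≠ [] := by
    rw [aDivisors_eq_map]
    intro h
    have hlen := congrArg List.length h
    simp [length_pyRange_one n hn] at hlen
    omega
  unfold solution solution_alt
  rw [counts_eq_aDivisors n hn]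
  exact final_eq (aDivisors n) hne
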